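-- pv_equiv track=rewrite | github.com/pgmmpk/pypatgen | patgen/__init__.py | evaluate_dictionary
-- ===== SOURCE A (Python) =====
-- EMPTYSET = frozenset()
--
-- MISSED_HYPHEN = '.'
--
-- TRUE_HYPHEN   = '-'
--
-- def apply_pattern_set(patternset, word, maxchunk, margin_left=1, margin_right=1):
--     '''
--     Applies a single pattern set to the word
--
--     Result is the set of indices that patterset "suggested".
--     For hyphenation patternsets, these are indices where hyphenation is predicted.
--     For inhibiting patternsets, these are indices where hyphenation is inhibited.
--     '''
--     word = '.' + word + '.'
--
--     prediction = set()
--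
--     for chunklen in range(1, maxchunk+1):
--         for start in range(0, len(word) - chunklen):
--             ch = word[start: start+chunklen]
--             allowed = patternset.get(ch, EMPTYSET)
--             for index in allowed:
--                 if start + index > margin_left and start+index <= len(word) - 1 - margin_right:
--                     prediction.add(index + start - 1)  # -1 corrects for the added front padding
--
--     return prediction
--
-- def apply_patterns(patterns, word, maxchunk, margin_left=1, margin_right=1):
--     '''
--     Applies patterns to a word.
--
--     Patterns "patterns" is a list of pattern sets. Hyphenation and inhibiting patternsets are
--     alternating: firt element in the list is a hyphenation pattern set, next one is inhibiting, and so on.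
--     In other words, even list slots contain hyphenation patterns. Odd ones contain inhibiting patterns.
--     '''
--     hyphens = set()
--     level = 0
--     for patternset in patterns:
--         level += 1
--
--         prediction = apply_pattern_set(patternset, word, maxchunk=maxchunk, margin_left=margin_left, margin_right=margin_right)
--
--         if level & 1:
--             # hyphenation level
--             hyphens.update(prediction)
--         else:
--             hyphens.difference_update(prediction)
--
--     return hyphens
--
-- def evaluate_dictionary(patterns, dictionary, weights, margin_left=1, margin_right=1):
--     '''
--     Evaluates the performance of patterns on a dictionary.
--
--     Returns number of hyphens in the dictionary, number of hyphens that patterns missed, and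
--     number of hyphens that were incorrectly introduced by the patterns.
--     '''
--
--     maxchunk = 0
--     for patternset in patterns:
--         if patternset:
--             maxchunk = max(maxchunk, max(len(x) for x in patternset.keys()))
--
--     total = 0
--     missed = 0
--     false = 0
--     for word, hyphens in dictionary.items():
--
--         prediction = apply_patterns(patterns, word, maxchunk, margin_left=margin_left, margin_right=margin_right)
--         weight = weights[word]
--
--         for i, code in enumerate(hyphens):
--             w = weight[i]
--             if code in (TRUE_HYPHEN, MISSED_HYPHEN):
--                 total += w
--                 if i not in prediction:
--                     missed += w
--             else:
--                 if i in prediction: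
--                     false += w
--
--     return total, missed, false
-- ===== SOURCE B (Python) =====
-- MISSED_HYPHEN = '.'
-- TRUE_HYPHEN = '-'
--
--
-- def _occurrence_predictions(patternset, text, margin_left, margin_right):
--     '''Positions suggested by one pattern set: for each pattern key, scan the
--     text for its occurrences and emit the allowed indices within the margins.'''
--     limit = len(text) - margin_right
--     prediction = set()
--     for ch, allowed in patternset.items():
--         if not ch:
--             continue  # an empty pattern key matches no chunk
--         for start in range(len(text) - len(ch) + 1):
--             if text[start: start + len(ch)] == ch:
--                 for index in allowed:
--                     pos = start + index
--                     if margin_left < pos <= limit: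
--                         prediction.add(pos - 1)
--     return prediction
--
--
-- def _hyphenation_points(patterns, word, margin_left, margin_right):
--     '''Alternating hyphenating / inhibiting levels, applied in order.'''
--     text = '.' + word
--     points = set()
--     level = 0
--     for patternset in patterns:
--         level += 1
--         prediction = _occurrence_predictions(patternset, text, margin_left, margin_right)
--         if level % 2:
--             points |= prediction
--         else:
--             points -= prediction
--     return points
--
--
-- def evaluate_dictionary(patterns, dictionary, weights, margin_left=1, margin_right=1):
--     total = 0
--     missed = 0
--     false = 0
--     for word, hyphens in dictionary.items():
--         points = _hyphenation_points(patterns, word, margin_left, margin_right)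
--         weight = weights[word]
--         total += sum(weight[i] for i, c in enumerate(hyphens) if c in (TRUE_HYPHEN, MISSED_HYPHEN))
--         missed += sum(weight[i] for i, c in enumerate(hyphens) if c in (TRUE_HYPHEN, MISSED_HYPHEN) and i not in points)
--         false += sum(weight[i] for i, c in enumerate(hyphens) if c not in (TRUE_HYPHEN, MISSED_HYPHEN) and i in points)
--     return total, missed, false
-- ===== Notes on version B (the rewrite author's own statement) =====
-- stated objective: alternative
-- what changed: B inverts A's scan: instead of looking up every substring of every chunk length up to a global maxchunk in each pattern dict, B iterates the pattern entries and searches each key's occurrences in the front-padded word directly (the maxchunk computation disappears), and accumulates the three counts as per-word filtered sums instead of a triple-accumulator loop.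
import Mathlib
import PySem

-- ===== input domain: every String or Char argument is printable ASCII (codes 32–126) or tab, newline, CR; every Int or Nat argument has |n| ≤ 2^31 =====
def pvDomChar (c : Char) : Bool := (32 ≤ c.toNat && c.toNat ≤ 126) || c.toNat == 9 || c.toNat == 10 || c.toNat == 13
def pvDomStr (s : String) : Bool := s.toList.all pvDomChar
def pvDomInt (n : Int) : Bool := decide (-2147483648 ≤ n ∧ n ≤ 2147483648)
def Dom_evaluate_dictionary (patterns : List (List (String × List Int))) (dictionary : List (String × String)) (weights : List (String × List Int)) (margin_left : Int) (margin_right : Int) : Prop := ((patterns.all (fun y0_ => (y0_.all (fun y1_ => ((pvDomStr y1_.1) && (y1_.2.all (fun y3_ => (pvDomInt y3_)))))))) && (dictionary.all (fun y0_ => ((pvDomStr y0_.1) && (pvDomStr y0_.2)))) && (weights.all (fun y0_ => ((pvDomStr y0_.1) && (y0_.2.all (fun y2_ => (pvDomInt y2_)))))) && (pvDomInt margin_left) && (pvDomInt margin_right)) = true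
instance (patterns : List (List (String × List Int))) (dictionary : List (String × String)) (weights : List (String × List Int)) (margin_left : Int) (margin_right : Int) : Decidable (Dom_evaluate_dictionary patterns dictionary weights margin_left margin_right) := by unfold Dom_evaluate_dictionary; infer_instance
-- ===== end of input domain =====

-- B inverts A's scan: instead of looking every chunk length (up to a global maxchunk) and
-- every start position up in the pattern dict, B walks the pattern entries and searches each
-- key's occurrences in the front-padded word, and totals the three counts as filtered sums;
-- same return value (objective: alternative).

-- ===== PORT A =====
-- dict arguments become PySem.Dict over List Char keys once, at entry (Python receives dicts)
def pvToPatDict (l : List (String × List Int)) : PySem.Dict (List Char) (List Int) :=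
  PySem.Dict.ofList (l.map (fun p => (p.1.toList, p.2)))

-- max(len(x) for x in patternset.keys()); only evaluated when the dict is nonempty
def pvA_maxKeyLen (ps : PySem.Dict (List Char) (List Int)) : Int :=
  (PySem.List.max? (ps.keys.map (fun k => (k.length : Int))) (fun x => x)).getD 0

def pvA_applyPatternSet (ps : PySem.Dict (List Char) (List Int)) (word : List Char)
    (maxchunk margin_left margin_right : Int) : PySem.Set Int :=
  let w := '.' :: word ++ ['.']
  (PySem.List.pyRange 1 (maxchunk + 1) 1).foldl (fun pred chunklen =>
    (PySem.List.pyRange 0 ((w.length : Int) - chunklen) 1).foldl (fun pred start =>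
      let ch := PySem.List.slice w (some start) (some (start + chunklen))
      let allowed := ps.getD ch []
      allowed.foldl (fun pred index =>
        if start + index > margin_left ∧ start + index ≤ (w.length : Int) - 1 - margin_right then
          PySem.Set.add pred (index + start - 1)
        else pred) pred) pred) PySem.Set.empty

def pvA_applyPatterns (pats : List (PySem.Dict (List Char) (List Int))) (word : List Char)
    (maxchunk margin_left margin_right : Int) : PySem.Set Int :=
  (pats.foldl (fun (st : PySem.Set Int × Int) ps =>
      let level := st.2 + 1
      let prediction := pvA_applyPatternSet ps word maxchunk margin_left margin_right
      (if PySem.Int.band level 1 ≠ 0 then PySem.Set.update st.1 prediction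
       else PySem.Set.diff st.1 prediction, level))
    (PySem.Set.empty, 0)).1

def evaluate_dictionary (patterns : List (List (String × List Int))) (dictionary : List (String × String)) (weights : List (String × List Int)) (margin_left : Int) (margin_right : Int) : List Int :=
  let pats := patterns.map pvToPatDict
  let dict := PySem.Dict.ofList (dictionary.map (fun p => (p.1.toList, p.2.toList)))
  let wts := PySem.Dict.ofList (weights.map (fun p => (p.1.toList, p.2)))
  let maxchunk := pats.foldl (fun mc ps => if ps.size ≠ 0 then max mc (pvA_maxKeyLen ps) else mc) 0
  let r := dict.items.foldl (fun (acc : Int × Int × Int) wh =>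
    let prediction := pvA_applyPatterns pats wh.1 maxchunk margin_left margin_right
    let weight := wts.getD wh.1 []
    (PySem.List.enumerate wh.2 0).foldl (fun (acc : Int × Int × Int) ic =>
      let w := (PySem.List.pyGet? weight ic.1).getD 0    -- in range on every input Pre_ admits
      if ic.2 = '-' ∨ ic.2 = '.' then
        (acc.1 + w, if ¬ PySem.Set.contains prediction ic.1 then acc.2.1 + w else acc.2.1, acc.2.2)
      else
        (acc.1, acc.2.1, if PySem.Set.contains prediction ic.1 then acc.2.2 + w else acc.2.2))
      acc) (0, 0, 0)
  [r.1, r.2.1, r.2.2]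

-- ===== PORT B =====
def pvB_occPredictions (ps : PySem.Dict (List Char) (List Int)) (text : List Char)
    (margin_left margin_right : Int) : PySem.Set Int :=
  let limit := (text.length : Int) - margin_right
  ps.items.foldl (fun pred kv =>
    if kv.1 = [] then pred   -- an empty pattern key matches no chunk
    else
      (PySem.List.pyRange 0 ((text.length : Int) - (kv.1.length : Int) + 1) 1).foldl (fun pred start =>
        if PySem.List.slice text (some start) (some (start + (kv.1.length : Int))) = kv.1 then
          kv.2.foldl (fun pred index =>
            if margin_left < start + index ∧ start + index ≤ limit then
              PySem.Set.add pred (start + index - 1)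
            else pred) pred
        else pred) pred) PySem.Set.empty

def pvB_hyphenationPoints (pats : List (PySem.Dict (List Char) (List Int))) (word : List Char)
    (margin_left margin_right : Int) : PySem.Set Int :=
  let text := '.' :: word
  (pats.foldl (fun (st : PySem.Set Int × Int) ps =>
      let level := st.2 + 1
      let prediction := pvB_occPredictions ps text margin_left margin_right
      (if PySem.Int.mod level 2 ≠ 0 then PySem.Set.update st.1 prediction
       else PySem.Set.diff st.1 prediction, level))
    (PySem.Set.empty, 0)).1

def evaluate_dictionary_alt (patterns : List (List (String × List Int))) (dictionary : List (String × String)) (weights : List (String × List Int)) (margin_left : Int) (margin_right : Int) : List Int :=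
  let pats := patterns.map pvToPatDict
  let dict := PySem.Dict.ofList (dictionary.map (fun p => (p.1.toList, p.2.toList)))
  let wts := PySem.Dict.ofList (weights.map (fun p => (p.1.toList, p.2)))
  let r := dict.items.foldl (fun (acc : Int × Int × Int) wh =>
    let points := pvB_hyphenationPoints pats wh.1 margin_left margin_right
    let weight := wts.getD wh.1 []
    let e := PySem.List.enumerate wh.2 0
    (acc.1 + ((e.filter (fun ic => decide (ic.2 = '-' ∨ ic.2 = '.'))).map
        (fun ic => (PySem.List.pyGet? weight ic.1).getD 0)).sum,
     acc.2.1 + ((e.filter (fun ic => decide ((ic.2 = '-' ∨ ic.2 = '.') ∧ ¬ PySem.Set.contains points ic.1))).map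
        (fun ic => (PySem.List.pyGet? weight ic.1).getD 0)).sum,
     acc.2.2 + ((e.filter (fun ic => decide (¬ (ic.2 = '-' ∨ ic.2 = '.') ∧ PySem.Set.contains points ic.1))).map
        (fun ic => (PySem.List.pyGet? weight ic.1).getD 0)).sum)) (0, 0, 0)
  [r.1, r.2.1, r.2.2]

-- ===== PRECONDITION & SPEC =====
-- Pre_ excludes exactly the inputs where A raises: a dictionary word missing from weights
-- (KeyError) or whose weight list is shorter than its hyphens string (IndexError).
def Pre_evaluate_dictionary (patterns : List (List (String × List Int))) (dictionary : List (String × String)) (weights : List (String × List Int)) (margin_left : Int) (margin_right : Int) : Prop :=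
  ∀ p ∈ (PySem.Dict.ofList (dictionary.map (fun q => (q.1.toList, q.2.toList)))).items,
    (PySem.Dict.ofList (weights.map (fun q => (q.1.toList, q.2)))).contains p.1 = true ∧
    p.2.length ≤ ((PySem.Dict.ofList (weights.map (fun q => (q.1.toList, q.2)))).getD p.1 []).length
instance (patterns : List (List (String × List Int))) (dictionary : List (String × String)) (weights : List (String × List Int)) (margin_left : Int) (margin_right : Int) : Decidable (Pre_evaluate_dictionary patterns dictionary weights margin_left margin_right) := by unfold Pre_evaluate_dictionary; infer_instance

def pvWitness_evaluate_dictionary : (List (List (String × List Int))) × (List (String × String)) × (List (String × List Int)) × Int × Int :=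
  ([[("a", [1])], [("b", [1])]], [("ab", "-x"), ("b", ".")], [("ab", [3, 5]), ("b", [2])], 1, 1)

def Spec_evaluate_dictionary (patterns : List (List (String × List Int))) (dictionary : List (String × String)) (weights : List (String × List Int)) (margin_left : Int) (margin_right : Int) (out : List Int) : Prop := out = evaluate_dictionary_alt patterns dictionary weights margin_left margin_right
instance (patterns : List (List (String × List Int))) (dictionary : List (String × String)) (weights : List (String × List Int)) (margin_left : Int) (margin_right : Int) (out : List Int) : Decidable (Spec_evaluate_dictionary patterns dictionary weights margin_left margin_right out) := by unfold Spec_evaluate_dictionary; infer_instance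

-- ===== CLAIM (what is proved, stated in full; the proofs are below) =====
def Claim_equal_evaluate_dictionary : Prop := ∀ (patterns : List (List (String × List Int))) (dictionary : List (String × String)) (weights : List (String × List Int)) (margin_left : Int) (margin_right : Int), Dom_evaluate_dictionary patterns dictionary weights margin_left margin_right → Pre_evaluate_dictionary patterns dictionary weights margin_left margin_right → Spec_evaluate_dictionary patterns dictionary weights margin_left margin_right (evaluate_dictionary patterns dictionary weights margin_left margin_right)

-- ===== LEMMAS AND PROOFS =====

-- membership through a fold that only ever adds elements
theorem pv_mem_foldl_iff {alpha beta : Type} [BEq beta] (g : PySem.Set beta → alpha → PySem.Set beta)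
    (P : alpha → Prop) (y : beta) (h : ∀ (s : PySem.Set beta) (x : alpha), y ∈ g s x ↔ y ∈ s ∨ P x) :
    ∀ (l : List alpha) (s : PySem.Set beta), y ∈ l.foldl g s ↔ y ∈ s ∨ ∃ x ∈ l, P x := by
  intro l
  induction l with
  | nil => intro s; simp
  | cons a t ih =>
    intro s
    rw [List.foldl_cons, ih, h]
    constructor
    · rintro ((hs | hp) | ⟨x, hx, hpx⟩)
      · exact Or.inl hs
      · exact Or.inr ⟨a, by simp, hp⟩
      · exact Or.inr ⟨x, by simp [hx], hpx⟩
    · rintro (hs | ⟨x, hx, hpx⟩)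
      · exact Or.inl (Or.inl hs)
      · rcases List.mem_cons.mp hx with rfl | hx
        · exact Or.inl (Or.inr hpx)
        · exact Or.inr ⟨x, hx, hpx⟩

theorem pv_slice_len (w : List Char) (a b : Int) (ha : 0 ≤ a) (hab : a ≤ b)
    (hb : b ≤ (w.length : Int)) :
    (PySem.List.slice w (some a) (some b)).length = (b - a).toNat := by
  rw [PySem.List.slice_toNat w ha (ha.trans hab)]
  simp only [List.length_take, List.length_drop]
  omega

theorem pv_slice_append_last (t : List Char) (c : Char) (a b : Int) (ha : 0 ≤ a) (hab : a ≤ b)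
    (hb : b ≤ (t.length : Int)) :
    PySem.List.slice (t ++ [c]) (some a) (some b) = PySem.List.slice t (some a) (some b) := by
  rw [PySem.List.slice_toNat _ ha (ha.trans hab), PySem.List.slice_toNat _ ha (ha.trans hab)]
  have h1 : a.toNat ≤ t.length := by omega
  rw [List.drop_append_of_le_length h1]
  rw [List.take_append_of_le_length (by simp only [List.length_drop]; omega)]

-- the common characterisation of a pattern set's prediction set
def pvMatch (ps : PySem.Dict (List Char) (List Int)) (t : List Char) (ml mr i : Int) : Prop :=
  ∃ kv ∈ ps.items, kv.1 ≠ [] ∧ ∃ start : Int, 0 ≤ start ∧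
    start + (kv.1.length : Int) ≤ (t.length : Int) ∧
    PySem.List.slice t (some start) (some (start + (kv.1.length : Int))) = kv.1 ∧
    ∃ idx ∈ kv.2, ml < start + idx ∧ start + idx ≤ (t.length : Int) - mr ∧ i = start + idx - 1

theorem pv_memB (ps : PySem.Dict (List Char) (List Int)) (t : List Char) (ml mr i : Int) :
    i ∈ pvB_occPredictions ps t ml mr ↔ pvMatch ps t ml mr i := by
  unfold pvB_occPredictions pvMatch
  rw [pv_mem_foldl_iff _
    (fun kv => kv.1 ≠ [] ∧ ∃ start : Int, 0 ≤ start ∧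
      start + (kv.1.length : Int) ≤ (t.length : Int) ∧
      PySem.List.slice t (some start) (some (start + (kv.1.length : Int))) = kv.1 ∧
      ∃ idx ∈ kv.2, ml < start + idx ∧ start + idx ≤ (t.length : Int) - mr ∧ i = start + idx - 1) i
    ?_ ps.items PySem.Set.empty]
  · simp [PySem.Set.empty]
  · intro s kv
    by_cases hke : kv.1 = []
    · simp [hke]
    · simp only [hke, if_false]
      rw [pv_mem_foldl_iff _
        (fun start => PySem.List.slice t (some start) (some (start + (kv.1.length : Int))) = kv.1 ∧
          ∃ idx ∈ kv.2, ml < start + idx ∧ start + idx ≤ (t.length : Int) - mr ∧ i = start + idx - 1) i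
        ?_ _ s]
      · constructor
        · rintro (hs | ⟨st, hst, hsl, hrest⟩)
          · exact Or.inl hs
          · rw [PySem.List.mem_pyRange_one] at hst
            exact Or.inr ⟨hke, st, hst.1, by omega, hsl, hrest⟩
        · rintro (hs | ⟨_, st, h0, hle, hsl, hrest⟩)
          · exact Or.inl hs
          · exact Or.inr ⟨st, PySem.List.mem_pyRange_one.mpr ⟨h0, by omega⟩, hsl, hrest⟩
      · intro s st
        by_cases hsl : PySem.List.slice t (some st) (some (st + (kv.1.length : Int))) = kv.1
        · rw [if_pos hsl]
          rw [pv_mem_foldl_iff _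
            (fun idx => ml < st + idx ∧ st + idx ≤ (t.length : Int) - mr ∧ i = st + idx - 1) i
            ?_ kv.2 s]
          · constructor
            · rintro (hs | ⟨idx, hidx, hc⟩)
              · exact Or.inl hs
              · exact Or.inr ⟨hsl, idx, hidx, hc⟩
            · rintro (hs | ⟨_, idx, hidx, hc⟩)
              · exact Or.inl hs
              · exact Or.inr ⟨idx, hidx, hc⟩
          · intro s idx
            split_ifs with hc
            · rw [PySem.Set.mem_add]
              constructor
              · rintro (hs | rfl)
                · exact Or.inl hs
                · exact Or.inr ⟨hc.1, hc.2, rfl⟩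
              · rintro (hs | ⟨h1, h2, rfl⟩)
                · exact Or.inl hs
                · exact Or.inr rfl
            · constructor
              · exact Or.inl
              · rintro (hs | ⟨h1, h2, _⟩)
                · exact hs
                · exact absurd ⟨h1, h2⟩ hc
        · rw [if_neg hsl]
          constructor
          · exact Or.inl
          · rintro (hs | ⟨hsl', _⟩)
            · exact hs
            · exact absurd hsl' hsl


theorem pv_memA (ps : PySem.Dict (List Char) (List Int)) (word : List Char)
    (mc ml mr i : Int) (hnd : ps.keys.Nodup)
    (hb : ∀ kv ∈ ps.items, (kv.1.length : Int) ≤ mc) :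
    i ∈ pvA_applyPatternSet ps word mc ml mr ↔ pvMatch ps ('.' :: word) ml mr i := by
  unfold pvA_applyPatternSet pvMatch
  have hw : ('.' :: word ++ ['.']) = ('.' :: word) ++ ['.'] := rfl
  have hwl : ((('.' :: word ++ ['.']).length : Int)) = (('.' :: word).length : Int) + 1 := by
    simp
  have hGet : ∀ (ch : List Char) (idx : Int), idx ∈ ps.getD ch [] →
      (ch, ps.getD ch []) ∈ ps.items := by
    intro ch idx hidx
    have hg : ps.getD ch [] = (ps.get? ch).getD [] := PySem.Dict.getD_eq_get?_getD ps ch []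
    cases hq : ps.get? ch with
    | none => rw [hg, hq] at hidx; simp at hidx
    | some al =>
      have hmem := PySem.Dict.mem_items_of_get?_eq_some ps hq
      rw [hg, hq]
      simpa using hmem
  rw [pv_mem_foldl_iff _
    (fun cl => ∃ st ∈ PySem.List.pyRange 0 ((('.' :: word ++ ['.']).length : Int) - cl) 1,
      ∃ idx ∈ ps.getD (PySem.List.slice ('.' :: word ++ ['.']) (some st) (some (st + cl))) [],
        (st + idx > ml ∧ st + idx ≤ (('.' :: word ++ ['.']).length : Int) - 1 - mr) ∧
        i = idx + st - 1) i
    ?_ _ PySem.Set.empty]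
  · constructor
    · rintro (hs | ⟨cl, hcl, st, hst, idx, hidx, ⟨hc1, hc2⟩, rfl⟩)
      · simp [PySem.Set.empty] at hs
      · rw [PySem.List.mem_pyRange_one] at hcl hst
        have hstw : st + cl ≤ ((('.' :: word).length : Int)) := by omega
        have hchlen : (PySem.List.slice ('.' :: word ++ ['.']) (some st) (some (st + cl))).length
            = (st + cl - st).toNat :=
          pv_slice_len _ st (st + cl) hst.1 (by omega) (by omega)
        have hchlenI : ((PySem.List.slice ('.' :: word ++ ['.']) (some st) (some (st + cl))).length : Int) = cl := by
          omega
        refine ⟨(PySem.List.slice ('.' :: word ++ ['.']) (some st) (some (st + cl)),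
            ps.getD (PySem.List.slice ('.' :: word ++ ['.']) (some st) (some (st + cl))) []),
          hGet _ idx hidx, ?_, st, hst.1, ?_, ?_, idx, hidx, by omega, by omega, by omega⟩
        · intro hnil
          dsimp only at hnil
          rw [hnil] at hchlenI
          simp at hchlenI
          omega
        · dsimp only
          omega
        · dsimp only
          rw [hchlenI, hw, pv_slice_append_last _ '.' st (st + cl) hst.1 (by omega) hstw]
    · rintro ⟨⟨ch, al⟩, hmem, hne, st, h0, hle, hsl, idx, hidx, hml, hmr, rfl⟩
      have hpos : 0 < ch.length := List.length_pos_iff.mpr hne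
      have hgetd : ps.getD ch [] = al := PySem.Dict.getD_of_mem_items ps hmem hnd []
      have hbd : (ch.length : Int) ≤ mc := hb (ch, al) hmem
      dsimp only at hne hle hsl hidx
      have hslw : PySem.List.slice ('.' :: word ++ ['.']) (some st) (some (st + (ch.length : Int))) = ch := by
        rw [hw, pv_slice_append_last _ '.' st (st + (ch.length : Int)) h0 (by omega) (by simpa using hle)]
        exact hsl
      refine Or.inr ⟨(ch.length : Int),
        PySem.List.mem_pyRange_one.mpr ⟨by omega, by omega⟩, st,
        PySem.List.mem_pyRange_one.mpr ⟨h0, by omega⟩, idx, ?_, ⟨by omega, by omega⟩, by omega⟩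
      rw [hslw, hgetd]
      exact hidx
  · intro s cl
    rw [pv_mem_foldl_iff _
      (fun st => ∃ idx ∈ ps.getD (PySem.List.slice ('.' :: word ++ ['.']) (some st) (some (st + cl))) [],
        (st + idx > ml ∧ st + idx ≤ (('.' :: word ++ ['.']).length : Int) - 1 - mr) ∧
        i = idx + st - 1) i
      ?_ _ s]
    intro s st
    dsimp only
    rw [pv_mem_foldl_iff _
      (fun idx => (st + idx > ml ∧ st + idx ≤ (('.' :: word ++ ['.']).length : Int) - 1 - mr) ∧
        i = idx + st - 1) i
      ?_ _ s]
    intro s idx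
    split_ifs with hc
    · rw [PySem.Set.mem_add]
      constructor
      · rintro (hs | rfl)
        · exact Or.inl hs
        · exact Or.inr ⟨hc, rfl⟩
      · rintro (hs | ⟨h1, rfl⟩)
        · exact Or.inl hs
        · exact Or.inr rfl
    · constructor
      · exact Or.inl
      · rintro (hs | ⟨h1, _⟩)
        · exact hs
        · exact absurd h1 hc

theorem pv_contains_iff {s : PySem.Set Int} {x : Int} : PySem.Set.contains s x = true ↔ x ∈ s := by
  unfold PySem.Set.contains
  exact List.contains_iff_mem

theorem pv_mc_mono : ∀ (l : List (PySem.Dict (List Char) (List Int))) (m : Int),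
    m ≤ l.foldl (fun mc ps => if ps.size ≠ 0 then max mc (pvA_maxKeyLen ps) else mc) m := by
  intro l
  induction l with
  | nil => intro m; simp
  | cons a t ih =>
    intro m
    rw [List.foldl_cons]
    refine le_trans ?_ (ih _)
    split_ifs with h
    · exact le_max_left _ _
    · exact le_refl m

theorem pv_maxKeyLen_bound (ps : PySem.Dict (List Char) (List Int)) (kv : List Char × List Int)
    (h : kv ∈ ps.items) : (kv.1.length : Int) ≤ pvA_maxKeyLen ps := by
  unfold pvA_maxKeyLen
  have hk : kv.1 ∈ ps.keys := PySem.Dict.mem_keys_of_mem_items ps h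
  have hm : ((kv.1.length : Int)) ∈ ps.keys.map (fun k => ((k.length : Int))) :=
    List.mem_map.mpr ⟨kv.1, hk, rfl⟩
  cases hmax : PySem.List.max? (ps.keys.map (fun k => ((k.length : Int)))) (fun x => x) with
  | none =>
    rw [PySem.List.max?_eq_none_iff] at hmax
    rw [hmax] at hm
    simp at hm
  | some m =>
    simpa using PySem.List.max?_isMax hmax _ hm

theorem pv_mc_bound : ∀ (l : List (PySem.Dict (List Char) (List Int))) (m : Int)
    (ps : PySem.Dict (List Char) (List Int)), ps ∈ l → ∀ kv ∈ ps.items,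
    (kv.1.length : Int) ≤ l.foldl (fun mc ps => if ps.size ≠ 0 then max mc (pvA_maxKeyLen ps) else mc) m := by
  intro l
  induction l with
  | nil => intro m ps hps; simp at hps
  | cons a t ih =>
    intro m ps hps kv hkv
    rw [List.foldl_cons]
    rcases List.mem_cons.mp hps with rfl | hps'
    · refine le_trans ?_ (pv_mc_mono t _)
      have hne : ps.items ≠ [] := fun he => by rw [he] at hkv; simp at hkv
      have hsz : ps.size ≠ 0 := by
        simpa [PySem.Dict.size] using (List.length_pos_iff.mpr hne).ne'
      rw [if_pos hsz]
      exact le_trans (pv_maxKeyLen_bound ps kv hkv) (le_max_right _ _)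
    · exact ih _ ps hps' kv hkv

theorem pv_levels_aux (pA pB : PySem.Dict (List Char) (List Int) → PySem.Set Int) :
    ∀ (pats : List (PySem.Dict (List Char) (List Int))),
    (∀ ps ∈ pats, ∀ j : Int, j ∈ pA ps ↔ j ∈ pB ps) →
    ∀ (S1 S2 : PySem.Set Int) (lv : Int), (∀ j : Int, j ∈ S1 ↔ j ∈ S2) →
    ∀ j : Int,
      (j ∈ (pats.foldl (fun (st : PySem.Set Int × Int) ps =>
          (if PySem.Int.band (st.2 + 1) 1 ≠ 0 then PySem.Set.update st.1 (pA ps)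
           else PySem.Set.diff st.1 (pA ps), st.2 + 1)) (S1, lv)).1 ↔
       j ∈ (pats.foldl (fun (st : PySem.Set Int × Int) ps =>
          (if PySem.Int.mod (st.2 + 1) 2 ≠ 0 then PySem.Set.update st.1 (pB ps)
           else PySem.Set.diff st.1 (pB ps), st.2 + 1)) (S2, lv)).1) := by
  intro pats
  induction pats with
  | nil =>
    intro _ S1 S2 lv hS j
    simpa using hS j
  | cons a t ih =>
    intro h S1 S2 lv hS j
    rw [List.foldl_cons, List.foldl_cons]
    dsimp only
    rw [PySem.Int.band_one]
    refine ih (fun ps hps => h ps (List.mem_cons_of_mem a hps)) _ _ (lv + 1) ?_ j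
    intro k
    split_ifs with hpar
    · rw [PySem.Set.mem_update, PySem.Set.mem_update, hS k, h a (by simp) k]
    · rw [PySem.Set.mem_diff, PySem.Set.mem_diff, hS k, h a (by simp) k]

theorem pv_count_fold (weight : List Int) (pred : PySem.Set Int) :
    ∀ (e : List (Int × Char)) (acc : Int × Int × Int),
    e.foldl (fun (acc : Int × Int × Int) ic =>
      let w := (PySem.List.pyGet? weight ic.1).getD 0
      if ic.2 = '-' ∨ ic.2 = '.' then
        (acc.1 + w, if ¬ PySem.Set.contains pred ic.1 then acc.2.1 + w else acc.2.1, acc.2.2)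
      else
        (acc.1, acc.2.1, if PySem.Set.contains pred ic.1 then acc.2.2 + w else acc.2.2)) acc
    = (acc.1 + ((e.filter (fun ic => decide (ic.2 = '-' ∨ ic.2 = '.'))).map
          (fun ic => (PySem.List.pyGet? weight ic.1).getD 0)).sum,
       acc.2.1 + ((e.filter (fun ic => decide ((ic.2 = '-' ∨ ic.2 = '.') ∧ ¬ PySem.Set.contains pred ic.1))).map
          (fun ic => (PySem.List.pyGet? weight ic.1).getD 0)).sum,
       acc.2.2 + ((e.filter (fun ic => decide (¬ (ic.2 = '-' ∨ ic.2 = '.') ∧ PySem.Set.contains pred ic.1))).map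
          (fun ic => (PySem.List.pyGet? weight ic.1).getD 0)).sum) := by
  intro e
  induction e with
  | nil => intro acc; simp
  | cons a t ih =>
    intro acc
    rw [List.foldl_cons, ih]
    by_cases hA : a.2 = '-' <;> by_cases hB : a.2 = '.' <;> by_cases h2 : a.1 ∈ pred <;>
      simp [hA, hB, h2, PySem.Set.contains] <;> ring_nf <;> simp

theorem pv_main (patterns : List (List (String × List Int))) (dictionary : List (String × String))
    (weights : List (String × List Int)) (ml mr : Int) :
    evaluate_dictionary patterns dictionary weights ml mr
      = evaluate_dictionary_alt patterns dictionary weights ml mr := by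
  unfold evaluate_dictionary evaluate_dictionary_alt
  dsimp only
  have hstep : (fun (acc : Int × Int × Int) (wh : List Char × List Char) =>
      (PySem.List.enumerate wh.2 0).foldl (fun (acc : Int × Int × Int) ic =>
        let w := (PySem.List.pyGet? ((PySem.Dict.ofList (weights.map (fun p => (p.1.toList, p.2)))).getD wh.1 []) ic.1).getD 0
        if ic.2 = '-' ∨ ic.2 = '.' then
          (acc.1 + w, if ¬ PySem.Set.contains (pvA_applyPatterns (patterns.map pvToPatDict) wh.1
              ((patterns.map pvToPatDict).foldl (fun mc ps => if ps.size ≠ 0 then max mc (pvA_maxKeyLen ps) else mc) 0) ml mr) ic.1 then acc.2.1 + w else acc.2.1, acc.2.2)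
        else
          (acc.1, acc.2.1, if PySem.Set.contains (pvA_applyPatterns (patterns.map pvToPatDict) wh.1
              ((patterns.map pvToPatDict).foldl (fun mc ps => if ps.size ≠ 0 then max mc (pvA_maxKeyLen ps) else mc) 0) ml mr) ic.1 then acc.2.2 + w else acc.2.2)) acc)
      = (fun (acc : Int × Int × Int) (wh : List Char × List Char) =>
      let points := pvB_hyphenationPoints (patterns.map pvToPatDict) wh.1 ml mr
      let weight := (PySem.Dict.ofList (weights.map (fun p => (p.1.toList, p.2)))).getD wh.1 []
      let e := PySem.List.enumerate wh.2 0
      (acc.1 + ((e.filter (fun ic => decide (ic.2 = '-' ∨ ic.2 = '.'))).map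
          (fun ic => (PySem.List.pyGet? weight ic.1).getD 0)).sum,
       acc.2.1 + ((e.filter (fun ic => decide ((ic.2 = '-' ∨ ic.2 = '.') ∧ ¬ PySem.Set.contains points ic.1))).map
          (fun ic => (PySem.List.pyGet? weight ic.1).getD 0)).sum,
       acc.2.2 + ((e.filter (fun ic => decide (¬ (ic.2 = '-' ∨ ic.2 = '.') ∧ PySem.Set.contains points ic.1))).map
          (fun ic => (PySem.List.pyGet? weight ic.1).getD 0)).sum)) := by
    funext acc wh
    dsimp only
    have hps : ∀ ps ∈ patterns.map pvToPatDict, ∀ j : Int,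
        j ∈ pvA_applyPatternSet ps wh.1
            ((patterns.map pvToPatDict).foldl (fun mc ps => if ps.size ≠ 0 then max mc (pvA_maxKeyLen ps) else mc) 0) ml mr
          ↔ j ∈ pvB_occPredictions ps ('.' :: wh.1) ml mr := by
      intro ps hpsmem j
      have hnd : ps.keys.Nodup := by
        rcases List.mem_map.mp hpsmem with ⟨l, _, rfl⟩
        exact PySem.Dict.nodup_keys_ofList _
      have hb : ∀ kv ∈ ps.items, (kv.1.length : Int) ≤
          (patterns.map pvToPatDict).foldl (fun mc ps => if ps.size ≠ 0 then max mc (pvA_maxKeyLen ps) else mc) 0 :=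
        fun kv hkv => pv_mc_bound (patterns.map pvToPatDict) 0 ps hpsmem kv hkv
      exact (pv_memA ps wh.1 _ ml mr j hnd hb).trans (pv_memB ps ('.' :: wh.1) ml mr j).symm
    have hmem : ∀ j : Int,
        j ∈ pvA_applyPatterns (patterns.map pvToPatDict) wh.1
            ((patterns.map pvToPatDict).foldl (fun mc ps => if ps.size ≠ 0 then max mc (pvA_maxKeyLen ps) else mc) 0) ml mr
          ↔ j ∈ pvB_hyphenationPoints (patterns.map pvToPatDict) wh.1 ml mr := by
      intro j
      unfold pvA_applyPatterns pvB_hyphenationPoints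
      exact pv_levels_aux _ _ (patterns.map pvToPatDict) hps
        PySem.Set.empty PySem.Set.empty 0 (fun _ => Iff.rfl) j
    have hcont : ∀ j : Int,
        PySem.Set.contains (pvA_applyPatterns (patterns.map pvToPatDict) wh.1
            ((patterns.map pvToPatDict).foldl (fun mc ps => if ps.size ≠ 0 then max mc (pvA_maxKeyLen ps) else mc) 0) ml mr) j
          = PySem.Set.contains (pvB_hyphenationPoints (patterns.map pvToPatDict) wh.1 ml mr) j := by
      intro j
      by_cases hj : j ∈ pvB_hyphenationPoints (patterns.map pvToPatDict) wh.1 ml mr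
      · rw [pv_contains_iff.mpr hj, pv_contains_iff.mpr ((hmem j).mpr hj)]
      · have h1 : PySem.Set.contains (pvB_hyphenationPoints (patterns.map pvToPatDict) wh.1 ml mr) j = false := by
          rw [← Bool.not_eq_true]
          exact fun hc => hj (pv_contains_iff.mp hc)
        have h2 : PySem.Set.contains (pvA_applyPatterns (patterns.map pvToPatDict) wh.1
            ((patterns.map pvToPatDict).foldl (fun mc ps => if ps.size ≠ 0 then max mc (pvA_maxKeyLen ps) else mc) 0) ml mr) j = false := by
          rw [← Bool.not_eq_true]
          exact fun hc => hj ((hmem j).mp (pv_contains_iff.mp hc))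
        rw [h1, h2]
    rw [pv_count_fold]
    simp only [hcont]
  rw [hstep]

-- ===== VERDICT (by name: the statement is the Claim_ definition above) =====
theorem evaluate_dictionary_spec : Claim_equal_evaluate_dictionary := by
  intro patterns dictionary weights margin_left margin_right _hdom _hpre
  unfold Spec_evaluate_dictionary
  exact pv_main patterns dictionary weights margin_left margin_right
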